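-- pv_equiv track=rewrite | github.com/Mambatukaa/problems | amazon/prep/17.minOperationsToMakeTheArrayAlternating.2170.py | minimumOperations
-- ===== SOURCE A (Python) =====
-- def minimumOperations(nums) -> int:
--     n = len(nums)
--
--     odd = {}
--     even = {}
--
--     for i in range(len(nums)):
--         if i % 2:
--             # odd
--             odd[nums[i]] =odd.get(nums[i], 0) + 1
--         else:
--             # even
--             even[nums[i]] = even.get(nums[i], 0) + 1
--
--     odd_first, odd_second = (None, 0), (None, 0)
--
--     for k, v in odd.items():
--         if odd_first[1] < v:
--             odd_first, odd_second = (k, v), odd_first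
--         elif odd_second[1] < v:
--             odd_second = (k, v)
--
--     even_first, even_second = (None, 0), (None, 0)
--
--     for k, v in even.items():
--         if even_first[1] < v:
--             even_first, even_second = (k, v), even_first
--         elif even_second[1] < v:
--             even_second = (k, v)
--
--     if odd_first[0] != even_first[0]:
--         return n - odd_first[1] - even_first[1]
--     else:
--         return n - max(odd_first[1] + even_second[1], even_first[1] + odd_second[1])
-- ===== SOURCE B (Python) =====
-- def minimumOperations(nums) -> int:
--     def counts(vals):
--         c = {}
--         for v in vals:
--             c[v] = c.get(v, 0) + 1
--         return c
--
--     even = counts(nums[0::2])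
--     odd = counts(nums[1::2])
--
--     m_odd = 0
--     for cb in odd.values():
--         if cb > m_odd:
--             m_odd = cb
--
--     # branch-and-bound pair maximisation: keep the largest total of an even-position
--     # value and a different odd-position value (either side may also stand alone);
--     # the inner scan is skipped when even a perfect odd partner could not beat best
--     best = 0
--     for a, ca in even.items():
--         if ca > best:
--             best = ca
--         if ca + m_odd > best:
--             for b, cb in odd.items():
--                 if a != b and ca + cb > best:
--                     best = ca + cb
--     for b, cb in odd.items():
--         if cb > best:
--             best = cb
--     return len(nums) - best
-- ===== Notes on version B (the rewrite author's own statement) =====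
-- stated objective: alternative
-- what changed: A greedily maintains the top-two frequencies of each parity in one pass and combines them; B slices the two parity sublists out, counts them, and finds the optimum by branch-and-bound maximisation over all pairs of one even-position value and a different odd-position value (each side may also stand alone), skipping the inner scan when even a perfect odd partner could not beat the current best.
import Mathlib
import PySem

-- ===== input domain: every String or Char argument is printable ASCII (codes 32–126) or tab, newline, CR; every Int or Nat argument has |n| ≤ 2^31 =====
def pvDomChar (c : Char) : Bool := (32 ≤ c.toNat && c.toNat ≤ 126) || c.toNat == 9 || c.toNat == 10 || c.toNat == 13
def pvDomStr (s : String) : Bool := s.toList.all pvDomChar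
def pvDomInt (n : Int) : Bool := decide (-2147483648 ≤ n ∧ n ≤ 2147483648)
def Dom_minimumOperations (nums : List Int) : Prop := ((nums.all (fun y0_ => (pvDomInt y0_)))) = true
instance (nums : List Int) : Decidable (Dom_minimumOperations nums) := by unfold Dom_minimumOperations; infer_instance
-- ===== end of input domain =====

-- B replaces A's greedy single-pass top-two tracker by slicing out the parity sublists,
-- counting them, and maximising over all pairs of one even-position value and a different
-- odd-position value, with a branch-and-bound skip of hopeless inner scans (objective: alternative).

-- ===== PORT A =====
-- the top-two tracker step of A's two identical `for k, v in d.items()` loops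
def pvStep (st : (Option Int × Int) × (Option Int × Int)) (kv : Int × Int) :
    (Option Int × Int) × (Option Int × Int) :=
  if st.1.2 < kv.2 then ((some kv.1, kv.2), st.1)
  else if st.2.2 < kv.2 then (st.1, (some kv.1, kv.2))
  else st

def minimumOperations (nums : List Int) : Int :=
  let n : Int := nums.length
  -- for i in range(len(nums)): update odd/even dicts (nums[i] is in range, so pyGetD is exact)
  let oe :=
    (PySem.List.pyRange 0 nums.length).foldl
      (fun (st : PySem.Dict Int Int × PySem.Dict Int Int) i =>
        if PySem.Int.mod i 2 ≠ 0 then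
          (st.1.insert (PySem.List.pyGetD nums i 0) (st.1.getD (PySem.List.pyGetD nums i 0) 0 + 1), st.2)
        else
          (st.1, st.2.insert (PySem.List.pyGetD nums i 0) (st.2.getD (PySem.List.pyGetD nums i 0) 0 + 1)))
      (PySem.Dict.empty, PySem.Dict.empty)
  let ofs := oe.1.items.foldl pvStep ((none, 0), (none, 0))
  let efs := oe.2.items.foldl pvStep ((none, 0), (none, 0))
  if ofs.1.1 ≠ efs.1.1 then n - ofs.1.2 - efs.1.2
  else n - max (ofs.1.2 + efs.2.2) (efs.1.2 + ofs.2.2)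

-- ===== PORT B =====
-- B's counts helper: a plain counting dict
def pvCounts (vals : List Int) : PySem.Dict Int Int :=
  vals.foldl (fun d v => d.insert v (d.getD v 0 + 1)) PySem.Dict.empty

def minimumOperations_alt (nums : List Int) : Int :=
  -- nums[0::2] / nums[1::2]; step 2 ≠ 0 so slice? never returns none and getD [] is exact
  let even := pvCounts ((PySem.List.slice? nums none none 2).getD [])
  let odd := pvCounts ((PySem.List.slice? nums (some 1) none 2).getD [])
  let mOdd := odd.values.foldl (fun m cb => if cb > m then cb else m) 0
  let best :=
    even.items.foldl (fun best ac =>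
      let best := if ac.2 > best then ac.2 else best
      if ac.2 + mOdd > best then
        odd.items.foldl (fun b bc => if ac.1 ≠ bc.1 ∧ ac.2 + bc.2 > b then ac.2 + bc.2 else b) best
      else best) 0
  let best := odd.items.foldl (fun b bc => if bc.2 > b then bc.2 else b) best
  (nums.length : Int) - best

-- ===== PRECONDITION & SPEC =====
def Spec_minimumOperations (nums : List Int) (out : Int) : Prop := out = minimumOperations_alt nums
instance (nums : List Int) (out : Int) : Decidable (Spec_minimumOperations nums out) := by unfold Spec_minimumOperations; infer_instance

-- ===== CLAIM (what is proved, stated in full; the proofs are below) =====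
def Claim_equal_minimumOperations : Prop := ∀ (nums : List Int), Dom_minimumOperations nums → Spec_minimumOperations nums (minimumOperations nums)

-- ===== LEMMAS AND PROOFS =====

-- (evens, odds): the elements of a list at even / odd positions
def pvSplit : List Int → List Int × List Int
  | [] => ([], [])
  | a :: t => (a :: (pvSplit t).2, (pvSplit t).1)

-- first two elements of a (value, count) list, padded with (none, 0)
def pvPad : List (Int × Int) → (Option Int × Int) × (Option Int × Int)
  | [] => ((none, 0), (none, 0))
  | [a] => ((some a.1, a.2), (none, 0))
  | a :: b :: _ => ((some a.1, a.2), (some b.1, b.2))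

-- B's maximisation written as a closed expression (definitionally B's folds)
def pvBest (mOdd : Int) (E O : List (Int × Int)) : Int :=
  O.foldl (fun b bc => if bc.2 > b then bc.2 else b)
    (E.foldl (fun best ac =>
      if ac.2 + mOdd > (if ac.2 > best then ac.2 else best) then
        O.foldl (fun b bc => if ac.1 ≠ bc.1 ∧ ac.2 + bc.2 > b then ac.2 + bc.2 else b)
          (if ac.2 > best then ac.2 else best)
      else (if ac.2 > best then ac.2 else best)) 0)

-- A's combination of the two padded top-two pairs
def pvKeep (ofs efs : (Option Int × Int) × (Option Int × Int)) : Int :=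
  if ofs.1.1 ≠ efs.1.1 then ofs.1.2 + efs.1.2
  else max (ofs.1.2 + efs.2.2) (efs.1.2 + ofs.2.2)

-- the values B's maximisation ranges over
def pvCand (E O : List (Int × Int)) (v : Int) : Prop :=
  (∃ ac, ac ∈ E ∧ v = ac.2) ∨ (∃ bc, bc ∈ O ∧ v = bc.2) ∨
  (∃ ac, ac ∈ E ∧ ∃ bc, bc ∈ O ∧ ac.1 ≠ bc.1 ∧ v = ac.2 + bc.2)

lemma pvPad_head (x : Int × Int) (t : List (Int × Int)) :
    (pvPad (x :: t)).1 = (some x.1, x.2) := by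
  rcases t <;> simp [pvPad]

lemma pvInnerP (a ca : Int) (O : List (Int × Int)) (b0 : Int) :
    b0 ≤ O.foldl (fun b bc => if a ≠ bc.1 ∧ ca + bc.2 > b then ca + bc.2 else b) b0 ∧
    (∀ bc ∈ O, a ≠ bc.1 → ca + bc.2 ≤ O.foldl (fun b bc => if a ≠ bc.1 ∧ ca + bc.2 > b then ca + bc.2 else b) b0) ∧
    (O.foldl (fun b bc => if a ≠ bc.1 ∧ ca + bc.2 > b then ca + bc.2 else b) b0 = b0 ∨
      ∃ bc, bc ∈ O ∧ a ≠ bc.1 ∧ O.foldl (fun b bc => if a ≠ bc.1 ∧ ca + bc.2 > b then ca + bc.2 else b) b0 = ca + bc.2) := by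
  induction O generalizing b0 with
  | nil => simp
  | cons bc t ih =>
    simp only [List.foldl_cons]
    obtain ⟨h0, h1, h2⟩ := ih (if a ≠ bc.1 ∧ ca + bc.2 > b0 then ca + bc.2 else b0)
    have hb01 : b0 ≤ (if a ≠ bc.1 ∧ ca + bc.2 > b0 then ca + bc.2 else b0) := by
      split_ifs with h; omega; omega
    refine ⟨le_trans hb01 h0, ?_, ?_⟩
    · intro x hx hne
      rcases List.mem_cons.mp hx with rfl | hx
      · have hxb : ca + x.2 ≤ (if a ≠ x.1 ∧ ca + x.2 > b0 then ca + x.2 else b0) := by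
          split_ifs with h
          · omega
          · have := not_and.mp h hne; omega
        exact le_trans hxb h0
      · exact h1 x hx hne
    · rcases h2 with h2 | ⟨x, hx, hxe, hr⟩
      · rw [h2]
        split_ifs with h
        · exact Or.inr ⟨bc, List.mem_cons_self, h.1, rfl⟩
        · exact Or.inl rfl
      · exact Or.inr ⟨x, List.mem_cons_of_mem _ hx, hxe, hr⟩

lemma pvSingleP (O : List (Int × Int)) (b0 : Int) :
    b0 ≤ O.foldl (fun b bc => if bc.2 > b then bc.2 else b) b0 ∧
    (∀ bc ∈ O, bc.2 ≤ O.foldl (fun b bc => if bc.2 > b then bc.2 else b) b0) ∧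
    (O.foldl (fun b bc => if bc.2 > b then bc.2 else b) b0 = b0 ∨
      ∃ bc, bc ∈ O ∧ O.foldl (fun b bc => if bc.2 > b then bc.2 else b) b0 = bc.2) := by
  induction O generalizing b0 with
  | nil => simp
  | cons bc t ih =>
    simp only [List.foldl_cons]
    obtain ⟨h0, h1, h2⟩ := ih (if bc.2 > b0 then bc.2 else b0)
    have hb01 : b0 ≤ (if bc.2 > b0 then bc.2 else b0) := by split_ifs with h; omega; omega
    refine ⟨le_trans hb01 h0, ?_, ?_⟩
    · intro x hx
      rcases List.mem_cons.mp hx with rfl | hx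
      · have hxb : x.2 ≤ (if x.2 > b0 then x.2 else b0) := by split_ifs with h; omega; omega
        exact le_trans hxb h0
      · exact h1 x hx
    · rcases h2 with h2 | ⟨x, hx, hr⟩
      · rw [h2]
        split_ifs with h
        · exact Or.inr ⟨bc, List.mem_cons_self, rfl⟩
        · exact Or.inl rfl
      · exact Or.inr ⟨x, List.mem_cons_of_mem _ hx, hr⟩

lemma pvOuterP (mOdd : Int) (E O : List (Int × Int)) (b0 : Int)
    (hM : ∀ bc ∈ O, bc.2 ≤ mOdd) :
    b0 ≤ E.foldl (fun best ac =>
        if ac.2 + mOdd > (if ac.2 > best then ac.2 else best) then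
          O.foldl (fun b bc => if ac.1 ≠ bc.1 ∧ ac.2 + bc.2 > b then ac.2 + bc.2 else b)
            (if ac.2 > best then ac.2 else best)
        else (if ac.2 > best then ac.2 else best)) b0 ∧
    (∀ ac ∈ E, ac.2 ≤ E.foldl (fun best ac =>
        if ac.2 + mOdd > (if ac.2 > best then ac.2 else best) then
          O.foldl (fun b bc => if ac.1 ≠ bc.1 ∧ ac.2 + bc.2 > b then ac.2 + bc.2 else b)
            (if ac.2 > best then ac.2 else best)
        else (if ac.2 > best then ac.2 else best)) b0) ∧
    (∀ ac ∈ E, ∀ bc ∈ O, ac.1 ≠ bc.1 → ac.2 + bc.2 ≤ E.foldl (fun best ac =>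
        if ac.2 + mOdd > (if ac.2 > best then ac.2 else best) then
          O.foldl (fun b bc => if ac.1 ≠ bc.1 ∧ ac.2 + bc.2 > b then ac.2 + bc.2 else b)
            (if ac.2 > best then ac.2 else best)
        else (if ac.2 > best then ac.2 else best)) b0) ∧
    (E.foldl (fun best ac =>
        if ac.2 + mOdd > (if ac.2 > best then ac.2 else best) then
          O.foldl (fun b bc => if ac.1 ≠ bc.1 ∧ ac.2 + bc.2 > b then ac.2 + bc.2 else b)
            (if ac.2 > best then ac.2 else best)
        else (if ac.2 > best then ac.2 else best)) b0 = b0 ∨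
      (∃ ac, ac ∈ E ∧ E.foldl (fun best ac =>
        if ac.2 + mOdd > (if ac.2 > best then ac.2 else best) then
          O.foldl (fun b bc => if ac.1 ≠ bc.1 ∧ ac.2 + bc.2 > b then ac.2 + bc.2 else b)
            (if ac.2 > best then ac.2 else best)
        else (if ac.2 > best then ac.2 else best)) b0 = ac.2) ∨
      (∃ ac, ac ∈ E ∧ ∃ bc, bc ∈ O ∧ ac.1 ≠ bc.1 ∧ E.foldl (fun best ac =>
        if ac.2 + mOdd > (if ac.2 > best then ac.2 else best) then
          O.foldl (fun b bc => if ac.1 ≠ bc.1 ∧ ac.2 + bc.2 > b then ac.2 + bc.2 else b)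
            (if ac.2 > best then ac.2 else best)
        else (if ac.2 > best then ac.2 else best)) b0 = ac.2 + bc.2)) := by
  induction E generalizing b0 with
  | nil => simp
  | cons ac t ih =>
    simp only [List.foldl_cons]
    by_cases hskip : ac.2 + mOdd > (if ac.2 > b0 then ac.2 else b0)
    · rw [if_pos hskip]
      obtain ⟨g0, g1, g2⟩ := pvInnerP ac.1 ac.2 O (if ac.2 > b0 then ac.2 else b0)
      obtain ⟨h0, h1, h1p, h2⟩ := ih (O.foldl
        (fun b bc => if ac.1 ≠ bc.1 ∧ ac.2 + bc.2 > b then ac.2 + bc.2 else b)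
        (if ac.2 > b0 then ac.2 else b0))
      have hb0m : b0 ≤ (if ac.2 > b0 then ac.2 else b0) := by split_ifs with h; omega; omega
      have hacm : ac.2 ≤ (if ac.2 > b0 then ac.2 else b0) := by split_ifs with h; omega; omega
      refine ⟨le_trans (le_trans hb0m g0) h0, ?_, ?_, ?_⟩
      · intro x hx
        rcases List.mem_cons.mp hx with rfl | hx
        · exact le_trans (le_trans hacm g0) h0
        · exact h1 x hx
      · intro x hx y hy hne
        rcases List.mem_cons.mp hx with rfl | hx
        · exact le_trans (g1 y hy hne) h0
        · exact h1p x hx y hy hne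
      · rcases h2 with h2 | h2 | h2
        · rw [h2]
          rcases g2 with g2 | ⟨y, hy, hye, hr⟩
          · rw [g2]
            split_ifs with h
            · exact Or.inr (Or.inl ⟨ac, List.mem_cons_self, rfl⟩)
            · exact Or.inl rfl
          · exact Or.inr (Or.inr ⟨ac, List.mem_cons_self, y, hy, hye, hr⟩)
        · obtain ⟨x, hx, hr⟩ := h2
          exact Or.inr (Or.inl ⟨x, List.mem_cons_of_mem _ hx, hr⟩)
        · obtain ⟨x, hx, y, hy, hye, hr⟩ := h2
          exact Or.inr (Or.inr ⟨x, List.mem_cons_of_mem _ hx, y, hy, hye, hr⟩)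
    · rw [if_neg hskip]
      obtain ⟨h0, h1, h1p, h2⟩ := ih (if ac.2 > b0 then ac.2 else b0)
      have hb0m : b0 ≤ (if ac.2 > b0 then ac.2 else b0) := by split_ifs with h; omega; omega
      have hacm : ac.2 ≤ (if ac.2 > b0 then ac.2 else b0) := by split_ifs with h; omega; omega
      refine ⟨le_trans hb0m h0, ?_, ?_, ?_⟩
      · intro x hx
        rcases List.mem_cons.mp hx with rfl | hx
        · exact le_trans hacm h0
        · exact h1 x hx
      · intro x hx y hy hne
        rcases List.mem_cons.mp hx with rfl | hx
        · have hyM := hM y hy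
          have : x.2 + y.2 ≤ (if x.2 > b0 then x.2 else b0) := by omega
          exact le_trans this h0
        · exact h1p x hx y hy hne
      · rcases h2 with h2 | h2 | h2
        · rw [h2]
          split_ifs with h
          · exact Or.inr (Or.inl ⟨ac, List.mem_cons_self, rfl⟩)
          · exact Or.inl rfl
        · obtain ⟨x, hx, hr⟩ := h2
          exact Or.inr (Or.inl ⟨x, List.mem_cons_of_mem _ hx, hr⟩)
        · obtain ⟨x, hx, y, hy, hye, hr⟩ := h2
          exact Or.inr (Or.inr ⟨x, List.mem_cons_of_mem _ hx, y, hy, hye, hr⟩)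

lemma pvBest_ub (mOdd : Int) (E O : List (Int × Int)) (v : Int)
    (hM : ∀ bc ∈ O, bc.2 ≤ mOdd) (h : pvCand E O v) : v ≤ pvBest mOdd E O := by
  unfold pvBest
  have hS := pvSingleP O
    (E.foldl (fun best ac =>
      if ac.2 + mOdd > (if ac.2 > best then ac.2 else best) then
        O.foldl (fun b bc => if ac.1 ≠ bc.1 ∧ ac.2 + bc.2 > b then ac.2 + bc.2 else b)
          (if ac.2 > best then ac.2 else best)
      else (if ac.2 > best then ac.2 else best)) 0)
  obtain ⟨s0, s1, -⟩ := hS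
  obtain ⟨o0, o1, o1p, -⟩ := pvOuterP mOdd E O 0 hM
  rcases h with ⟨x, hx, rfl⟩ | ⟨y, hy, rfl⟩ | ⟨x, hx, y, hy, hne, rfl⟩
  · exact le_trans (o1 x hx) s0
  · exact s1 y hy
  · exact le_trans (o1p x hx y hy hne) s0

lemma pvBest_attained (mOdd : Int) (E O : List (Int × Int))
    (hM : ∀ bc ∈ O, bc.2 ≤ mOdd) :
    pvBest mOdd E O = 0 ∨ pvCand E O (pvBest mOdd E O) := by
  unfold pvBest
  have hS := pvSingleP O
    (E.foldl (fun best ac =>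
      if ac.2 + mOdd > (if ac.2 > best then ac.2 else best) then
        O.foldl (fun b bc => if ac.1 ≠ bc.1 ∧ ac.2 + bc.2 > b then ac.2 + bc.2 else b)
          (if ac.2 > best then ac.2 else best)
      else (if ac.2 > best then ac.2 else best)) 0)
  obtain ⟨-, -, s2⟩ := hS
  rcases s2 with s2 | ⟨y, hy, hr⟩
  · rw [s2]
    obtain ⟨-, -, -, o2⟩ := pvOuterP mOdd E O 0 hM
    rcases o2 with o2 | ⟨x, hx, hr⟩ | ⟨x, hx, y, hy, hye, hr⟩
    · exact Or.inl o2
    · exact Or.inr (Or.inl ⟨x, hx, hr⟩)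
    · exact Or.inr (Or.inr (Or.inr ⟨x, hx, y, hy, hye, hr⟩))
  · exact Or.inr (Or.inr (Or.inl ⟨y, hy, hr⟩))

lemma pvOnlyO (mOdd : Int) (O : List (Int × Int)) (o1 : Int × Int)
    (hM : ∀ bc ∈ O, bc.2 ≤ mOdd)
    (hO1 : ∀ kv ∈ O, 1 ≤ kv.2) (ho1 : o1 ∈ O) (hmax : ∀ y ∈ O, y.2 ≤ o1.2) :
    pvBest mOdd [] O = o1.2 := by
  refine le_antisymm ?_ (pvBest_ub mOdd _ _ _ hM (Or.inr (Or.inl ⟨o1, ho1, rfl⟩)))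
  rcases pvBest_attained mOdd [] O hM with h | ⟨x, hx, _⟩ | ⟨y, hy, hv⟩ | ⟨x, hx, _⟩
  · rw [h]; have := hO1 o1 ho1; omega
  · simp at hx
  · rw [hv]; exact hmax y hy
  · simp at hx

lemma pvOnlyE (mOdd : Int) (E : List (Int × Int)) (e1 : Int × Int)
    (hE1 : ∀ kv ∈ E, 1 ≤ kv.2) (he1 : e1 ∈ E) (hmax : ∀ x ∈ E, x.2 ≤ e1.2) :
    pvBest mOdd E [] = e1.2 := by
  refine le_antisymm ?_ (pvBest_ub mOdd _ _ _ (by simp) (Or.inl ⟨e1, he1, rfl⟩))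
  rcases pvBest_attained mOdd E [] (by simp) with h | ⟨x, hx, hv⟩ | ⟨y, hy, _⟩ | ⟨x, _, y, hy, _⟩
  · rw [h]; have := hE1 e1 he1; omega
  · rw [hv]; exact hmax x hx
  · simp at hy
  · simp at hy

lemma pvDiffCase (mOdd : Int) (E O : List (Int × Int)) (e1 o1 : Int × Int)
    (hM : ∀ bc ∈ O, bc.2 ≤ mOdd)
    (hE1 : ∀ kv ∈ E, 1 ≤ kv.2) (hO1 : ∀ kv ∈ O, 1 ≤ kv.2)
    (he1 : e1 ∈ E) (ho1 : o1 ∈ O)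
    (hEmax : ∀ x ∈ E, x.2 ≤ e1.2) (hOmax : ∀ y ∈ O, y.2 ≤ o1.2)
    (hkey : e1.1 ≠ o1.1) :
    pvBest mOdd E O = e1.2 + o1.2 := by
  refine le_antisymm ?_ (pvBest_ub mOdd _ _ _ hM (Or.inr (Or.inr ⟨e1, he1, o1, ho1, hkey, rfl⟩)))
  have he1p := hE1 e1 he1
  have ho1p := hO1 o1 ho1
  rcases pvBest_attained mOdd E O hM with h | ⟨x, hx, hv⟩ | ⟨y, hy, hv⟩ | ⟨x, hx, y, hy, hne, hv⟩
  · omega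
  · have := hEmax x hx; omega
  · have := hOmax y hy; omega
  · have := hEmax x hx; have := hOmax y hy; omega

lemma pvEqCase (mOdd : Int) (E O : List (Int × Int)) (e1 o1 : Int × Int) (E2 O2 : Int)
    (hM : ∀ bc ∈ O, bc.2 ≤ mOdd)
    (hE1 : ∀ kv ∈ E, 1 ≤ kv.2) (hO1 : ∀ kv ∈ O, 1 ≤ kv.2)
    (he1 : e1 ∈ E) (ho1 : o1 ∈ O)
    (hEmax : ∀ x ∈ E, x.2 ≤ e1.2) (hOmax : ∀ y ∈ O, y.2 ≤ o1.2)
    (hkey : e1.1 = o1.1)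
    (hE2nn : 0 ≤ E2) (hO2nn : 0 ≤ O2)
    (hE2ub : ∀ x ∈ E, x.1 ≠ e1.1 → x.2 ≤ E2)
    (hO2ub : ∀ y ∈ O, y.1 ≠ o1.1 → y.2 ≤ O2)
    (hE2at : E2 = 0 ∨ ∃ x, x ∈ E ∧ x.1 ≠ e1.1 ∧ x.2 = E2)
    (hO2at : O2 = 0 ∨ ∃ y, y ∈ O ∧ y.1 ≠ o1.1 ∧ y.2 = O2) :
    max (o1.2 + E2) (e1.2 + O2) = pvBest mOdd E O := by
  have he1p := hE1 e1 he1
  have ho1p := hO1 o1 ho1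
  refine le_antisymm (max_le ?_ ?_) ?_
  · rcases hE2at with rfl | ⟨x, hx, hxk, rfl⟩
    · have := pvBest_ub mOdd E O o1.2 hM (Or.inr (Or.inl ⟨o1, ho1, rfl⟩)); omega
    · have : x.1 ≠ o1.1 := by rw [← hkey]; exact hxk
      have := pvBest_ub mOdd E O (x.2 + o1.2) hM (Or.inr (Or.inr ⟨x, hx, o1, ho1, this, rfl⟩)); omega
  · rcases hO2at with rfl | ⟨y, hy, hyk, rfl⟩
    · have := pvBest_ub mOdd E O e1.2 hM (Or.inl ⟨e1, he1, rfl⟩); omega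
    · have : e1.1 ≠ y.1 := by rw [hkey]; exact fun h => hyk h.symm
      have := pvBest_ub mOdd E O (e1.2 + y.2) hM (Or.inr (Or.inr ⟨e1, he1, y, hy, this, rfl⟩)); omega
  · have hml := le_max_left (o1.2 + E2) (e1.2 + O2)
    have hmr := le_max_right (o1.2 + E2) (e1.2 + O2)
    rcases pvBest_attained mOdd E O hM with h | ⟨x, hx, hv⟩ | ⟨y, hy, hv⟩ | ⟨x, hx, y, hy, hne, hv⟩
    · omega
    · have := hEmax x hx; omega
    · have := hOmax y hy; omega
    · by_cases hxk : x.1 = e1.1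
      · have hyk : y.1 ≠ o1.1 := by rw [← hkey, ← hxk]; exact fun h => hne h.symm
        have h1 := hO2ub y hy hyk
        have h2 := hEmax x hx
        omega
      · have h1 := hE2ub x hx hxk
        have h2 := hOmax y hy
        omega

-- facts about the head and second element of a count-descending rearrangement
lemma pvHeadFacts (E : List (Int × Int)) (e1 : Int × Int) (tE : List (Int × Int))
    (hperm : (e1 :: tE).Perm E) (hp : (e1 :: tE).Pairwise (fun a b => b.2 ≤ a.2)) :
    e1 ∈ E ∧ ∀ x ∈ E, x.2 ≤ e1.2 := by
  obtain ⟨h1, -⟩ := List.pairwise_cons.mp hp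
  refine ⟨hperm.subset List.mem_cons_self, fun x hx => ?_⟩
  rcases List.mem_cons.mp (hperm.mem_iff.mpr hx) with rfl | hx'
  · exact le_refl _
  · exact h1 x hx'

lemma pvTail1Facts (E : List (Int × Int)) (e1 : Int × Int)
    (hperm : [e1].Perm E) :
    ∀ x ∈ E, x.1 ≠ e1.1 → False := by
  intro x hx hne
  have := hperm.mem_iff.mpr hx
  simp at this
  exact hne (by rw [this])

lemma pvTail2Facts (E : List (Int × Int)) (e1 e2 : Int × Int) (t2 : List (Int × Int))
    (hperm : (e1 :: e2 :: t2).Perm E) (hp : (e1 :: e2 :: t2).Pairwise (fun a b => b.2 ≤ a.2))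
    (hnd : ((e1 :: e2 :: t2).map (fun kv => kv.1)).Nodup) :
    e2 ∈ E ∧ e2.1 ≠ e1.1 ∧ ∀ x ∈ E, x.1 ≠ e1.1 → x.2 ≤ e2.2 := by
  obtain ⟨-, hp2⟩ := List.pairwise_cons.mp hp
  obtain ⟨h2, -⟩ := List.pairwise_cons.mp hp2
  have hk12 : e2.1 ≠ e1.1 := by
    simp only [List.map_cons, List.nodup_cons, List.mem_cons] at hnd
    exact fun h => hnd.1 (Or.inl h.symm)
  refine ⟨hperm.subset (List.mem_cons_of_mem _ List.mem_cons_self), hk12, fun x hx hne => ?_⟩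
  rcases List.mem_cons.mp (hperm.mem_iff.mpr hx) with rfl | hx'
  · exact absurd rfl hne
  · rcases List.mem_cons.mp hx' with rfl | hx''
    · exact le_refl _
    · exact h2 x hx''

-- the central equivalence: A's top-two combination equals B's exhaustive maximisation
lemma pvKeep_eq_best (mOdd : Int) (E O : List (Int × Int))
    (hM : ∀ bc ∈ O, bc.2 ≤ mOdd)
    (hE1 : ∀ kv ∈ E, 1 ≤ kv.2) (hO1 : ∀ kv ∈ O, 1 ≤ kv.2)
    (hEn : (E.map (fun kv => kv.1)).Nodup) (hOn : (O.map (fun kv => kv.1)).Nodup) :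
    pvKeep (pvPad (PySem.List.sorted O (fun kv => kv.2) true))
           (pvPad (PySem.List.sorted E (fun kv => kv.2) true)) = pvBest mOdd E O := by
  have hpermE : (PySem.List.sorted E (fun kv : Int × Int => kv.2) true).Perm E :=
    PySem.List.sorted_perm E (fun kv => kv.2) true
  have hpermO : (PySem.List.sorted O (fun kv : Int × Int => kv.2) true).Perm O :=
    PySem.List.sorted_perm O (fun kv => kv.2) true
  have hpE : (PySem.List.sorted E (fun kv : Int × Int => kv.2) true).Pairwise
      (fun a b => b.2 ≤ a.2) := PySem.List.sorted_pairwise_rev E (fun kv => kv.2)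
  have hpO : (PySem.List.sorted O (fun kv : Int × Int => kv.2) true).Pairwise
      (fun a b => b.2 ≤ a.2) := PySem.List.sorted_pairwise_rev O (fun kv => kv.2)
  have hndE : ((PySem.List.sorted E (fun kv : Int × Int => kv.2) true).map
      (fun kv => kv.1)).Nodup := ((hpermE.map (fun kv => kv.1)).nodup_iff).mpr hEn
  have hndO : ((PySem.List.sorted O (fun kv : Int × Int => kv.2) true).map
      (fun kv => kv.1)).Nodup := ((hpermO.map (fun kv => kv.1)).nodup_iff).mpr hOn
  rcases hsE : PySem.List.sorted E (fun kv : Int × Int => kv.2) true with _ | ⟨e1, tE⟩ <;>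
    rw [hsE] at hpermE hpE hndE <;>
    rcases hsO : PySem.List.sorted O (fun kv : Int × Int => kv.2) true with _ | ⟨o1, tO⟩ <;>
    rw [hsO] at hpermO hpO hndO
  · -- both parities empty
    have hEe : E = [] := hpermE.symm.eq_nil
    have hOe : O = [] := hpermO.symm.eq_nil
    subst hEe hOe
    simp [pvPad, pvKeep, pvBest]
  · -- even side empty
    have hEe : E = [] := hpermE.symm.eq_nil
    obtain ⟨ho1, hOmax⟩ := pvHeadFacts O o1 tO hpermO hpO
    subst hEe
    rw [pvOnlyO mOdd O o1 hM hO1 ho1 hOmax] at *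
    rcases tO with _ | ⟨o2, t2⟩ <;> simp [pvPad, pvKeep]
  · -- odd side empty
    have hOe : O = [] := hpermO.symm.eq_nil
    obtain ⟨he1, hEmax⟩ := pvHeadFacts E e1 tE hpermE hpE
    subst hOe
    rw [pvOnlyE mOdd E e1 hE1 he1 hEmax] at *
    rcases tE with _ | ⟨e2, t2⟩ <;> simp [pvPad, pvKeep]
  · -- both parities nonempty
    obtain ⟨he1, hEmax⟩ := pvHeadFacts E e1 tE hpermE hpE
    obtain ⟨ho1, hOmax⟩ := pvHeadFacts O o1 tO hpermO hpO
    by_cases hk : o1.1 = e1.1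
    · have hEside : ∃ E2, (pvPad (e1 :: tE)).2.2 = E2 ∧ 0 ≤ E2 ∧
          (∀ x ∈ E, x.1 ≠ e1.1 → x.2 ≤ E2) ∧
          (E2 = 0 ∨ ∃ x, x ∈ E ∧ x.1 ≠ e1.1 ∧ x.2 = E2) := by
        rcases tE with _ | ⟨e2, t2⟩
        · exact ⟨0, rfl, le_refl 0,
            fun x hx hne => (pvTail1Facts E e1 hpermE x hx hne).elim, Or.inl rfl⟩
        · obtain ⟨he2, hk21, hub⟩ := pvTail2Facts E e1 e2 t2 hpermE hpE hndE
          exact ⟨e2.2, rfl, by have := hE1 e2 he2; omega, hub, Or.inr ⟨e2, he2, hk21, rfl⟩⟩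
      have hOside : ∃ O2, (pvPad (o1 :: tO)).2.2 = O2 ∧ 0 ≤ O2 ∧
          (∀ y ∈ O, y.1 ≠ o1.1 → y.2 ≤ O2) ∧
          (O2 = 0 ∨ ∃ y, y ∈ O ∧ y.1 ≠ o1.1 ∧ y.2 = O2) := by
        rcases tO with _ | ⟨o2, t2⟩
        · exact ⟨0, rfl, le_refl 0,
            fun y hy hne => (pvTail1Facts O o1 hpermO y hy hne).elim, Or.inl rfl⟩
        · obtain ⟨ho2, hk21, hub⟩ := pvTail2Facts O o1 o2 t2 hpermO hpO hndO
          exact ⟨o2.2, rfl, by have := hO1 o2 ho2; omega, hub, Or.inr ⟨o2, ho2, hk21, rfl⟩⟩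
      obtain ⟨E2, hpadE, hE2nn, hE2ub, hE2at⟩ := hEside
      obtain ⟨O2, hpadO, hO2nn, hO2ub, hO2at⟩ := hOside
      have hmain := pvEqCase mOdd E O e1 o1 E2 O2 hM hE1 hO1 he1 ho1 hEmax hOmax hk.symm
        hE2nn hO2nn hE2ub hO2ub hE2at hO2at
      unfold pvKeep
      rw [if_neg (by simp [pvPad_head, hk])]
      simp only [pvPad_head]
      rw [hpadE, hpadO]
      exact hmain
    · have hd := pvDiffCase mOdd E O e1 o1 hM hE1 hO1 he1 ho1 hEmax hOmax (fun h => hk h.symm)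
      unfold pvKeep
      rw [if_pos (by simp [pvPad_head]; exact hk)]
      simp only [pvPad_head]
      rw [hd]
      omega

-- every value of the dict is bounded by the m_odd fold
lemma pvMaxValuesP (l : List Int) (m0 : Int) :
    m0 ≤ l.foldl (fun m cb => if cb > m then cb else m) m0 ∧
    ∀ c ∈ l, c ≤ l.foldl (fun m cb => if cb > m then cb else m) m0 := by
  induction l generalizing m0 with
  | nil => simp
  | cons c t ih =>
    simp only [List.foldl_cons]
    obtain ⟨h0, h1⟩ := ih (if c > m0 then c else m0)
    have hm : m0 ≤ (if c > m0 then c else m0) := by split_ifs with h; omega; omega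
    have hc : c ≤ (if c > m0 then c else m0) := by split_ifs with h; omega; omega
    exact ⟨le_trans hm h0, fun x hx => by
      rcases List.mem_cons.mp hx with rfl | hx
      · exact le_trans hc h0
      · exact h1 x hx⟩

lemma pvCounter_items_pos (xs : List Int) :
    ∀ kv ∈ (PySem.Dict.counter xs).items, 1 ≤ kv.2 := by
  intro kv hkv
  rw [PySem.Dict.items_counter] at hkv
  obtain ⟨k, hk, rfl⟩ := List.mem_map.mp hkv
  have : k ∈ xs := (PySem.Set.mem_ofList xs k).mp hk
  have hc := List.count_pos_iff.mpr this
  simp only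
  exact_mod_cast hc

lemma pvCounter_items_nodup (xs : List Int) :
    (((PySem.Dict.counter xs).items).map (fun kv => kv.1)).Nodup := by
  have := PySem.Dict.nodup_keys_counter (xs := xs)
  simpa [PySem.Dict.keys] using this

-- A's tracker fold equals pvPad of the count-descending stable sort
lemma pvStep_pad (s : List (Int × Int)) (x : Int × Int) (hx : 1 ≤ x.2) :
    pvStep (pvPad s) x = pvPad (PySem.List.insertBy (fun a b => decide ((fun kv : Int × Int => kv.2) b < (fun kv : Int × Int => kv.2) a)) x s) := by
  rcases s with _ | ⟨a, _ | ⟨b, t⟩⟩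
  · simp [pvStep, pvPad, PySem.List.insertBy]; omega
  · by_cases h : a.2 < x.2
    · simp [pvStep, pvPad, PySem.List.insertBy, h]
    · simp [pvStep, pvPad, PySem.List.insertBy, h]; omega
  · by_cases h1 : a.2 < x.2
    · simp [pvStep, pvPad, PySem.List.insertBy, h1]
    · by_cases h2 : b.2 < x.2
      · simp [pvStep, pvPad, PySem.List.insertBy, h1, h2]
      · simp [pvStep, pvPad, PySem.List.insertBy, h1, h2]

lemma pvTracker_eq_pad (l : List (Int × Int)) (h : ∀ kv ∈ l, 1 ≤ kv.2) :
    l.foldl pvStep ((none, 0), (none, 0)) =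
      pvPad (PySem.List.sorted l (fun kv => kv.2) true) := by
  induction l using List.reverseRecOn with
  | nil => simp [pvPad, PySem.List.sorted]
  | append_singleton l x ih =>
    rw [List.foldl_append, List.foldl_cons, List.foldl_nil,
      ih (fun kv hkv => h kv (List.mem_append_left _ hkv))]
    have hx : PySem.List.sorted (l ++ [x]) (fun kv : Int × Int => kv.2) true =
        PySem.List.insertBy (fun a b => decide ((fun kv : Int × Int => kv.2) b < (fun kv : Int × Int => kv.2) a)) x
          (PySem.List.sorted l (fun kv => kv.2) true) := by
      rw [PySem.List.sorted_rev_eq_foldl_insertBy (l ++ [x]), List.foldl_append, List.foldl_cons,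
        List.foldl_nil, ← PySem.List.sorted_rev_eq_foldl_insertBy]
    rw [hx]
    exact pvStep_pad _ x (h x (by simp))

lemma pvFilterMap_split (xs : List Int) :
    (List.range ((xs.length + 1) / 2)).filterMap (fun k => xs[2 * k]?) = (pvSplit xs).1 ∧
    (List.range (xs.length / 2)).filterMap (fun k => xs[2 * k + 1]?) = (pvSplit xs).2 := by
  induction xs with
  | nil => simp [pvSplit]
  | cons a t ih =>
    constructor
    · have h2 : ((a :: t).length + 1) / 2 = t.length / 2 + 1 := by simp; omega
      rw [h2, List.range_succ_eq_map, List.filterMap_cons, List.filterMap_map]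
      have hf : ((fun k => (a :: t)[2 * k]?) ∘ Nat.succ) = (fun k => t[2 * k + 1]?) := by
        funext k
        show (a :: t)[2 * (k + 1)]? = t[2 * k + 1]?
        have : 2 * (k + 1) = (2 * k + 1) + 1 := by ring
        rw [this, List.getElem?_cons_succ]
      rw [hf, ih.2]
      simp [pvSplit]
    · have h2 : (a :: t).length / 2 = (t.length + 1) / 2 := by simp
      have hf : (fun k => (a :: t)[2 * k + 1]?) = (fun k => t[2 * k]?) := by
        funext k; rw [List.getElem?_cons_succ]
      rw [h2, hf, ih.1]
      simp [pvSplit]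

lemma pvSlice_even (xs : List Int) :
    PySem.List.slice? xs none none 2 = some (pvSplit xs).1 := by
  simp only [PySem.List.slice?, PySem.List.sliceIndices]
  norm_num
  have hc : (if 0 < xs.length then (((xs.length : Int) + 2 - 1) / 2).toNat else 0)
      = (xs.length + 1) / 2 := by split <;> omega
  have hf : (fun k : Nat => xs[(2 * (k : Int)).toNat]?) = (fun k => xs[2 * k]?) := by
    funext k; congr 1; try omega
  rw [hf, hc, (pvFilterMap_split xs).1]

lemma pvSlice_odd (xs : List Int) :
    PySem.List.slice? xs (some 1) none 2 = some (pvSplit xs).2 := by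
  rcases xs with _ | ⟨a, t⟩
  · decide
  · simp only [PySem.List.slice?, PySem.List.sliceIndices]
    norm_num
    have hc : (if 0 < t.length then (((t.length : Int) + 2 - 1) / 2).toNat else 0)
        = (a :: t).length / 2 := by simp only [List.length_cons]; split <;> omega
    have hf : (fun k : Nat => (a :: t)[(1 + 2 * (k : Int)).toNat]?) = (fun k => (a :: t)[2 * k + 1]?) := by
      funext k; congr 1; try omega
    rw [hf, hc, (pvFilterMap_split (a :: t)).2]

lemma pvLoopA (nums : List Int) :
    ∀ (l : List Int) (k : Nat), l = nums.drop k →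
      ∀ (o e : PySem.Dict Int Int),
      (PySem.List.pyRange (k : Int) (nums.length : Int)).foldl
        (fun (st : PySem.Dict Int Int × PySem.Dict Int Int) i =>
          if PySem.Int.mod i 2 ≠ 0 then
            (st.1.insert (PySem.List.pyGetD nums i 0) (st.1.getD (PySem.List.pyGetD nums i 0) 0 + 1), st.2)
          else
            (st.1, st.2.insert (PySem.List.pyGetD nums i 0) (st.2.getD (PySem.List.pyGetD nums i 0) 0 + 1)))
        (o, e) =
      (if k % 2 = 0 then
        ((pvSplit l).2.foldl (fun d v => d.insert v (d.getD v 0 + 1)) o,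
         (pvSplit l).1.foldl (fun d v => d.insert v (d.getD v 0 + 1)) e)
       else
        ((pvSplit l).1.foldl (fun d v => d.insert v (d.getD v 0 + 1)) o,
         (pvSplit l).2.foldl (fun d v => d.insert v (d.getD v 0 + 1)) e)) := by
  intro l
  induction l with
  | nil =>
    intro k hk o e
    have hlen : nums.length ≤ k := by
      by_contra h
      have := List.drop_eq_nil_iff.mp hk.symm
      omega
    have : PySem.List.pyRange (k : Int) (nums.length : Int) = [] := by
      simp [PySem.List.pyRange]; omega
    rw [this]
    simp [pvSplit]
  | cons x t ih =>
    intro k hk o e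
    have hlt : k < nums.length := by
      by_contra h
      rw [List.drop_eq_nil_iff.mpr (by omega)] at hk
      exact List.cons_ne_nil x t hk
    have h0 : nums[k]? = some x := by
      have hdd : (List.drop k nums)[0]? = nums[k + 0]? := List.getElem?_drop
      rw [← hk] at hdd
      simpa using hdd.symm
    have hget : nums.getD k 0 = x := by
      simp [List.getD, h0]
    rw [PySem.List.pyRange_one_cons (by exact_mod_cast hlt), List.foldl_cons]
    have hmod : PySem.Int.mod (k : Int) 2 = ((k % 2 : Nat) : Int) := PySem.Int.mod_natCast k 2
    have htail : t = nums.drop (k + 1) := by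
      have := congrArg List.tail hk
      simpa using this
    have hstep := ih (k + 1) htail
    have hcast : ((k : Int) + 1) = ((k + 1 : Nat) : Int) := by push_cast; ring
    rcases Nat.even_or_odd k with he | ho
    · have hk0 : k % 2 = 0 := Nat.even_iff.mp he
      have hk1 : (k + 1) % 2 = 1 := by omega
      rw [if_neg (by rw [hmod, hk0]; simp)]
      simp only [PySem.List.pyGetD_natCast, hget]
      rw [hcast, hstep, hk1]
      simp [pvSplit, hk0]
    · have hk0 : k % 2 = 1 := Nat.odd_iff.mp ho
      have hk1 : (k + 1) % 2 = 0 := by omega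
      rw [if_pos (by rw [hmod, hk0]; simp)]
      simp only [PySem.List.pyGetD_natCast, hget]
      rw [hcast, hstep, hk1]
      simp [pvSplit, hk0]

-- ===== VERDICT (by name: the statement is the Claim_ definition above) =====
theorem minimumOperations_spec : Claim_equal_minimumOperations := by
  intro nums _
  show minimumOperations nums = minimumOperations_alt nums
  have hA := pvLoopA nums nums 0 rfl PySem.Dict.empty PySem.Dict.empty
  simp only [Nat.cast_zero, Nat.zero_mod, if_true,
    PySem.Dict.foldl_insert_getD_add_one_eq_counter] at hA
  unfold minimumOperations minimumOperations_alt pvCounts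
  rw [hA, pvSlice_odd nums, pvSlice_even nums]
  simp only [Option.getD_some, PySem.Dict.foldl_insert_getD_add_one_eq_counter]
  rw [pvTracker_eq_pad _ (pvCounter_items_pos (pvSplit nums).2),
    pvTracker_eq_pad _ (pvCounter_items_pos (pvSplit nums).1)]
  have hMv : ∀ bc ∈ (PySem.Dict.counter (pvSplit nums).2).items,
      bc.2 ≤ ((PySem.Dict.counter (pvSplit nums).2).values).foldl
        (fun m cb => if cb > m then cb else m) 0 := by
    intro bc hbc
    exact (pvMaxValuesP ((PySem.Dict.counter (pvSplit nums).2).values) 0).2 bc.2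
      (by simp only [PySem.Dict.values]; exact List.mem_map.mpr ⟨bc, hbc, rfl⟩)
  have hk := pvKeep_eq_best
    (((PySem.Dict.counter (pvSplit nums).2).values).foldl
      (fun m cb => if cb > m then cb else m) 0)
    (PySem.Dict.counter (pvSplit nums).1).items
    (PySem.Dict.counter (pvSplit nums).2).items hMv
    (pvCounter_items_pos _) (pvCounter_items_pos _)
    (pvCounter_items_nodup _) (pvCounter_items_nodup _)
  unfold pvKeep pvBest at hk
  split_ifs at hk ⊢ with h
  · omega
  · omega
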